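-- pv_equiv track=rewrite | github.com/hosod/swim-record-db | swimrecord/views.py | rank
-- ===== SOURCE A (Python) =====
-- def rank(point_sw):
--     name, point = point_sw[0]
--     current = 1
--     same = 1
--     pre_pt = point
--     result = list()
--     result.append(current)
--
--     for index in range(1, len(point_sw)):
--         name, point = point_sw[index]
--         if point < pre_pt:
--             current = current + same
--             same = 1
--             pre_pt = point
--         else:
--             same += 1
--         result.append(current)
--
--     return result
-- ===== SOURCE B (Python) =====
-- def rank(point_sw):
--     points = [p for _, p in point_sw]
--     m = points[0]
--     starts = [0]
--     for i in range(1, len(points)):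
--         if points[i] < m:
--             m = points[i]
--             starts.append(i)
--     starts.append(len(points))
--     out = []
--     for a, b in zip(starts, starts[1:]):
--         out += [a + 1] * (b - a)
--     return out
-- ===== Notes on version B (the rewrite author's own statement) =====
-- stated objective: alternative
-- what changed: B replaces A's per-element emit with a tie-counter by a staged group/run-length scheme: extract the points, one pass collects the strict running-minimum record indices (group starts), then adjacent pairs of starts are expanded into runs [start+1]*(next-start).
import Mathlib
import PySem

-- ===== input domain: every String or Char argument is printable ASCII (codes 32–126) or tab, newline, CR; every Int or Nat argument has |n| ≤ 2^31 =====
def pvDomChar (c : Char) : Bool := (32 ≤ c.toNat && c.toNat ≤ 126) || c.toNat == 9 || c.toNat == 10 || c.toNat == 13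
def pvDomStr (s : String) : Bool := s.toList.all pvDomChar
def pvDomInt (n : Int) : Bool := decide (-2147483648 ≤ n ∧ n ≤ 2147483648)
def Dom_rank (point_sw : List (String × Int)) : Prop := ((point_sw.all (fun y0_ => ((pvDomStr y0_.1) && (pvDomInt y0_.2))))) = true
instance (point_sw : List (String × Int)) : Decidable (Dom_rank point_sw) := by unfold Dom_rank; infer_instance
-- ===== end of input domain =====

-- B computes the ranks in stages (record indices of the running minimum, then run-length
-- expansion of the groups) instead of A's per-element emit with a tie counter (objective: alternative).

-- ===== PORT A =====
-- A's `for index in range(1, len(point_sw))` reads exactly the tail elements in order,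
-- so the loop is ported as structural recursion over the tail (exact on every input).
def rankLoopA : List (String × Int) → Int → Int → Int → List Int → List Int
  | [], _, _, _, result => result
  | (_, point) :: rest, current, same, pre_pt, result =>
    if point < pre_pt then
      rankLoopA rest (current + same) 1 point (result ++ [current + same])
    else
      rankLoopA rest current (same + 1) pre_pt (result ++ [current])

def rank (point_sw : List (String × Int)) : List Int :=
  match point_sw with
  | [] => []   -- unreachable: Python A raises IndexError here, excluded by Pre_rank
  | (_, point) :: rest => rankLoopA rest 1 1 point [1]

-- ===== PORT B =====
-- pass 1 of Source B: `for i in range(1, len(points))` collecting the indices where points[i]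
-- is a strict new running minimum (the group starts); ported over the tail with index i.
def bStartsLoop : List Int → Int → Int → List Int
  | [], _, _ => []
  | p :: rest, i, m => if p < m then i :: bStartsLoop rest (i + 1) p else bStartsLoop rest (i + 1) m

-- pass 2 of Source B: `for a, b in zip(starts, starts[1:]): out += [a+1]*(b-a)`
-- (Python `[x]*k` is empty for k ≤ 0; `Int.toNat` clamps the same way).
def bExpandLoop : List (Int × Int) → List Int → List Int
  | [], out => out
  | (a, b) :: rest, out => bExpandLoop rest (out ++ List.replicate (b - a).toNat (a + 1))

def rank_alt (point_sw : List (String × Int)) : List Int :=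
  match point_sw.map Prod.snd with   -- `points = [p for _, p in point_sw]`
  | [] => []   -- unreachable: Python B raises IndexError at points[0], excluded by Pre_rank
  | p0 :: ptsTl =>
    let startsAll := (0 :: bStartsLoop ptsTl 1 p0) ++ [(point_sw.length : Int)]
    bExpandLoop (startsAll.zip (startsAll.drop 1)) []

-- ===== PRECONDITION & SPEC =====
-- Pre_ excludes only the empty list, on which both Pythons raise IndexError.
def Pre_rank (point_sw : List (String × Int)) : Prop := point_sw ≠ []
instance (point_sw : List (String × Int)) : Decidable (Pre_rank point_sw) := by unfold Pre_rank; infer_instance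
def pvWitness_rank : (List (String × Int)) := [("a", 10), ("b", 10), ("c", 7)]

def Spec_rank (point_sw : List (String × Int)) (out : List Int) : Prop := out = rank_alt point_sw
instance (point_sw : List (String × Int)) (out : List Int) : Decidable (Spec_rank point_sw out) := by unfold Spec_rank; infer_instance

-- ===== CLAIM (what is proved, stated in full; the proofs are below) =====
def Claim_equal_rank : Prop := ∀ (point_sw : List (String × Int)), Dom_rank point_sw → Pre_rank point_sw → Spec_rank point_sw (rank point_sw)

-- ===== LEMMAS AND PROOFS =====

-- Proof-side intermediate: a per-element single pass carrying (index, current rank, running min);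
-- both ports are proved equal to it.
def midLoop : List (String × Int) → Int → Int → Int → List Int
  | [], _, _, _ => []
  | (_, point) :: rest, i, cur, pre =>
    if point < pre then
      (i + 1) :: midLoop rest (i + 1) (i + 1) point
    else
      cur :: midLoop rest (i + 1) cur pre

-- Proof-side: chunked expansion whose first chunk starts mid-group at index i with rank r.
def chunksFrom : Int → Int → List Int → Int → List Int
  | r, i, [], e => List.replicate (e - i).toNat r
  | r, i, s :: ss, e => List.replicate (s - i).toNat r ++ chunksFrom (s + 1) s ss e

-- A = mid: A's `same` equals i + 1 - current when mid is about to process index i.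
theorem rankLoop_eq (rest : List (String × Int)) :
    ∀ (i cur pre : Int) (acc : List Int),
      rankLoopA rest cur (i + 1 - cur) pre acc = acc ++ midLoop rest i cur pre := by
  induction rest with
  | nil => intro i cur pre acc; simp [rankLoopA, midLoop]
  | cons hd tl ih =>
    intro i cur pre acc
    obtain ⟨n, p⟩ := hd
    by_cases h : p < pre
    · simp only [rankLoopA, midLoop, if_pos h]
      have h1 : cur + (i + 1 - cur) = i + 1 := by ring
      rw [h1]
      have key := ih (i + 1) (i + 1) p (acc ++ [i + 1])
      norm_num at key
      rw [key]
    · simp only [rankLoopA, midLoop, if_neg h]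
      have h2 : i + 1 - cur + 1 = (i + 1) + 1 - cur := by ring
      rw [h2]
      rw [ih (i + 1) cur pre (acc ++ [cur])]
      simp

theorem bStartsLoop_ge (pts : List Int) :
    ∀ (i m s : Int), s ∈ bStartsLoop pts i m → i ≤ s := by
  induction pts with
  | nil => intro i m s h; simp [bStartsLoop] at h
  | cons p rest ih =>
    intro i m s h
    simp only [bStartsLoop] at h
    split_ifs at h with hp
    · rcases List.mem_cons.mp h with h1 | h1
      · omega
      · have := ih (i + 1) p s h1; omega
    · have := ih (i + 1) m s h; omega

theorem chunksFrom_cons (r i e : Int) (ss : List Int)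
    (h : match ss with | [] => i + 1 ≤ e | s :: _ => i + 1 ≤ s) :
    chunksFrom r i ss e = r :: chunksFrom r (i + 1) ss e := by
  cases ss with
  | nil =>
    simp only [chunksFrom]
    have : (e - i).toNat = (e - (i + 1)).toNat + 1 := by omega
    rw [this, List.replicate_succ]
  | cons s ss' =>
    simp only [chunksFrom]
    have : (s - i).toNat = (s - (i + 1)).toNat + 1 := by omega
    rw [this, List.replicate_succ]
    simp

-- mid = chunked expansion of the records of the running minimum.
theorem midLoop_eq_chunks (rest : List (String × Int)) :
    ∀ (i cur m : Int),
      midLoop rest i cur m =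
        chunksFrom cur i (bStartsLoop (rest.map Prod.snd) i m) (i + rest.length) := by
  induction rest with
  | nil => intro i cur m; simp [midLoop, bStartsLoop, chunksFrom]
  | cons hd tl ih =>
    intro i cur m
    obtain ⟨n, p⟩ := hd
    by_cases h : p < m
    · simp only [midLoop, List.map_cons, bStartsLoop, if_pos h, List.length_cons]
      have hz : (i - i).toNat = 0 := by omega
      simp only [chunksFrom, hz, List.replicate_zero, List.nil_append]
      have hc : chunksFrom (i + 1) i (bStartsLoop (tl.map Prod.snd) (i + 1) p) (i + (tl.length + 1))
          = (i + 1) :: chunksFrom (i + 1) (i + 1) (bStartsLoop (tl.map Prod.snd) (i + 1) p) (i + (tl.length + 1)) := by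
        apply chunksFrom_cons
        cases hS : bStartsLoop (tl.map Prod.snd) (i + 1) p with
        | nil => simp
        | cons s ss' =>
          have : s ∈ bStartsLoop (tl.map Prod.snd) (i + 1) p := by rw [hS]; exact List.mem_cons_self ..
          exact bStartsLoop_ge _ _ _ _ this
      push_cast
      rw [hc, ih (i + 1) (i + 1) p]
      congr 1
      congr 1
      omega
    · simp only [midLoop, List.map_cons, bStartsLoop, if_neg h, List.length_cons]
      have hc : chunksFrom cur i (bStartsLoop (tl.map Prod.snd) (i + 1) m) (i + (tl.length + 1))
          = cur :: chunksFrom cur (i + 1) (bStartsLoop (tl.map Prod.snd) (i + 1) m) (i + (tl.length + 1)) := by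
        apply chunksFrom_cons
        cases hS : bStartsLoop (tl.map Prod.snd) (i + 1) m with
        | nil => simp
        | cons s ss' =>
          have : s ∈ bStartsLoop (tl.map Prod.snd) (i + 1) m := by rw [hS]; exact List.mem_cons_self ..
          exact bStartsLoop_ge _ _ _ _ this
      push_cast
      rw [hc, ih (i + 1) cur m]
      congr 1
      congr 1
      omega

theorem bExpandLoop_acc (l : List (Int × Int)) :
    ∀ (acc : List Int), bExpandLoop l acc = acc ++ bExpandLoop l [] := by
  induction l with
  | nil => intro acc; simp [bExpandLoop]
  | cons hd tl ih =>
    intro acc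
    obtain ⟨a, b⟩ := hd
    simp only [bExpandLoop]
    rw [ih (acc ++ List.replicate (b - a).toNat (a + 1)), ih ([] ++ List.replicate (b - a).toNat (a + 1))]
    simp

-- The zip-of-adjacent-pairs expansion equals the chunked expansion.
theorem expand_pairs_eq (ss : List Int) :
    ∀ (a e : Int),
      bExpandLoop ((a :: (ss ++ [e])).zip ((a :: (ss ++ [e])).drop 1)) [] =
        chunksFrom (a + 1) a ss e := by
  induction ss with
  | nil =>
    intro a e
    simp [bExpandLoop, chunksFrom, List.zip]
  | cons s ss' ih =>
    intro a e
    have hzip : (a :: ((s :: ss') ++ [e])).zip ((a :: ((s :: ss') ++ [e])).drop 1)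
        = (a, s) :: ((s :: (ss' ++ [e])).zip ((s :: (ss' ++ [e])).drop 1)) := by
      simp [List.zip]
    rw [hzip]
    simp only [bExpandLoop, List.nil_append]
    rw [bExpandLoop_acc, ih s e]
    simp [chunksFrom]

-- ===== VERDICT (by name: the statement is the Claim_ definition above) =====
theorem rank_spec : Claim_equal_rank := by
  intro point_sw _ hpre
  unfold Spec_rank
  match point_sw with
  | [] => exact absurd rfl hpre
  | (n, p) :: rest =>
    show rankLoopA rest 1 1 p [1] = rank_alt ((n, p) :: rest)
    have key := rankLoop_eq rest 1 1 p [1]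
    norm_num at key
    rw [key]
    have hmid : midLoop ((n, p) :: rest) 0 1 p = 1 :: midLoop rest 1 1 p := by
      simp [midLoop]
    have h1 := midLoop_eq_chunks ((n, p) :: rest) 0 1 p
    rw [hmid] at h1
    have h2 : rank_alt ((n, p) :: rest)
        = chunksFrom 1 0 (bStartsLoop (rest.map Prod.snd) 1 p) (((n, p) :: rest).length) := by
      show bExpandLoop _ [] = _
      have := expand_pairs_eq (bStartsLoop (rest.map Prod.snd) 1 p) 0 (((n, p) :: rest).length : Int)
      simpa using this
    rw [h2]
    have hstarts : bStartsLoop (((n, p) :: rest).map Prod.snd) 0 p = bStartsLoop (rest.map Prod.snd) 1 p := by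
      simp [bStartsLoop]
    rw [hstarts] at h1
    have hlen : ((0 : Int) + (((n, p) :: rest).length : Int)) = (((n, p) :: rest).length : Int) := by ring
    rw [hlen] at h1
    simpa using h1
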